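-- pv_equiv track=rewrite | github.com/expectedparrot/edsl | edsl/extensions/__main__.py | sanitize_service_name
-- ===== SOURCE A (Python) =====
-- def sanitize_service_name(name: str) -> str:
--     """Sanitize a service name to be Cloud Run compatible.
--
--     Cloud Run requirements:
--     - Only lowercase alphanumeric characters and dashes
--     - Cannot begin or end with a dash
--     - Maximum length of 63 characters
--     """
--     # Convert to lowercase and replace invalid chars with dashes
--     sanitized = ''.join(c if c.isalnum() else '-' for c in name.lower())
--
--     # Remove consecutive dashes
--     while '--' in sanitized:
--         sanitized = sanitized.replace('--', '-')
--
--     # Remove leading and trailing dashes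
--     sanitized = sanitized.strip('-')
--
--     # Ensure length limit
--     if len(sanitized) > 63:
--         sanitized = sanitized[:63].rstrip('-')
--
--     return sanitized
-- ===== SOURCE B (Python) =====
-- def sanitize_service_name(name: str) -> str:
--     """Single forward pass: map, collapse dashes and drop leading dashes in one loop."""
--     buf = []
--     for c in name.lower():
--         if c.isalnum():
--             buf.append(c)
--         elif buf and buf[-1] != '-':
--             buf.append('-')
--     s = ''.join(buf).rstrip('-')
--     if len(s) > 63:
--         s = s[:63].rstrip('-')
--     return s
-- ===== Notes on version B (the rewrite author's own statement) =====
-- stated objective: simpler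
-- what changed: Replaces A's pipeline of char-mapping, a repeated whole-string replace loop that collapses double dashes, and an ends-strip by a single forward pass that appends each alphanumeric char and appends a dash only when the buffer is non-empty and does not already end in a dash, fusing the mapping, the dash collapse and the leading-dash strip into one loop.
import Mathlib
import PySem

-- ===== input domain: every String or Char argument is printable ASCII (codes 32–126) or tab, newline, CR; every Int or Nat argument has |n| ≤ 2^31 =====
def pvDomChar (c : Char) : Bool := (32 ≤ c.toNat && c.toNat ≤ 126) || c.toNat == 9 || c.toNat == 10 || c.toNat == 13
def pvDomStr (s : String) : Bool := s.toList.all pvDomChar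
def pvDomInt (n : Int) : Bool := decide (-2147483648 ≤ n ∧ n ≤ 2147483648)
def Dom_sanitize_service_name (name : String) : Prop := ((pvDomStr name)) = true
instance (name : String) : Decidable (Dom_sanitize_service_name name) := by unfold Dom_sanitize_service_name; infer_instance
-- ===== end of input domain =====

-- B fuses A's map / collapse-'--' / leading-dash strip into one forward pass (objective: simpler).

-- ===== PORT A =====
-- A's while-replace('--','-') loop needs a termination measure, so the next
-- definitions and lemmas characterise one pass of str.replace('--','-').

-- one left-to-right pass of str.replace('--','-') (model used only for termination/proofs)
def pvRep : List Char → List Char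
  | [] => []
  | [c] => [c]
  | c :: d :: t => if c = '-' ∧ d = '-' then '-' :: pvRep t else c :: pvRep (d :: t)

theorem pvRep_length_le (s : List Char) : (pvRep s).length ≤ s.length := by
  fun_induction pvRep with
  | case1 => simp
  | case2 c => simp
  | case3 c d t h ih => simp; omega
  | case4 c d t h ih => simp at ih ⊢; omega

theorem pvGo_spec (fuel : Nat) : ∀ (l acc : List Char), l.length ≤ fuel →
    PySem.Chars.replace.go ['-','-'] ['-'] fuel l acc = acc.reverse ++ pvRep l := by
  induction fuel with
  | zero =>
    intro l acc h
    have : l = [] := by cases l <;> simp_all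
    subst this; rw [PySem.Chars.replace.go]; simp [pvRep]
  | succ n ih =>
    intro l acc h
    match l with
    | [] => rw [PySem.Chars.replace.go]; simp [pvRep]; omega
    | c :: t =>
      rw [PySem.Chars.replace.go]
      by_cases hp : ['-','-'].isPrefixOf (c :: t) = true
      · rw [if_pos hp]
        obtain ⟨t', ht⟩ := List.isPrefixOf_iff_prefix.mp hp
        have hc : c = '-' ∧ t = '-' :: t' := by
          cases ht; exact ⟨rfl, rfl⟩
        obtain ⟨hc1, hc2⟩ := hc
        subst hc1; subst hc2
        simp only [List.length_cons] at h
        have hdrop : List.drop (['-','-'] : List Char).length ('-' :: '-' :: t') = t' := rfl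
        have hrev : (['-'] : List Char).reverse ++ acc = '-' :: acc := rfl
        rw [hdrop, hrev, ih t' ('-' :: acc) (by omega)]
        rw [pvRep.eq_3, if_pos ⟨rfl, rfl⟩]
        simp
      · rw [if_neg hp]
        simp only [List.length_cons] at h
        rw [ih t (c :: acc) (by omega)]
        have : pvRep (c :: t) = c :: pvRep t := by
          match t with
          | [] => simp [pvRep]
          | d :: t' =>
            have : ¬ (c = '-' ∧ d = '-') := by
              intro ⟨h1, h2⟩; subst h1; subst h2
              simp [List.isPrefixOf] at hp
            rw [pvRep.eq_3, if_neg this]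
        rw [this]; simp

theorem pvReplace_eq (s : List Char) :
    PySem.Chars.replace s ['-','-'] ['-'] = pvRep s := by
  show PySem.Chars.replace s ['-','-'] ['-'] = pvRep s
  rw [PySem.Chars.replace]
  simp only [List.isEmpty_cons, if_false, Bool.false_eq_true]
  exact pvGo_spec s.length s [] le_rfl

theorem pvRep_length_lt (s : List Char) (h : ['-','-'] <:+: s) :
    (pvRep s).length < s.length := by
  fun_induction pvRep with
  | case1 => simp at h
  | case2 c =>
    exfalso
    obtain ⟨p, q, hs⟩ := h
    have := congrArg List.length hs; simp at this; omega
  | case3 c d t hcd ih =>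
    have := pvRep_length_le t
    simp; omega
  | case4 c d t hcd ih =>
    simp only [List.length_cons]
    have hdt : ['-','-'] <:+: d :: t := by
      rcases (List.infix_cons_iff).mp h with hpre | htail
      · exfalso
        obtain ⟨t', ht⟩ := hpre
        cases ht
        exact hcd ⟨rfl, rfl⟩
      · exact htail
    have := ih hdt
    simp only [List.length_cons] at this
    omega

-- the 'while "--" in sanitized' loop of A
def pvALoop (s : List Char) : List Char :=
  if PySem.Chars.isIn ['-','-'] s then pvALoop (PySem.Chars.replace s ['-','-'] ['-']) else s
termination_by s.length
decreasing_by
  rw [pvReplace_eq]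
  exact pvRep_length_lt s ((PySem.Chars.isIn_iff_infix _ _).mp (by assumption))

-- hand port of str.rstrip('-') (PySem has only the both-ends stripChars); exact: drops trailing '-'
def pvRStripDash (s : List Char) : List Char :=
  (s.reverse.dropWhile (fun c => c == '-')).reverse

def sanitize_service_name (name : String) : String :=
  let m := (PySem.Chars.lower name.toList).map (fun c => if PySem.Chars.isalnum c then c else '-')
  let s1 := pvALoop m
  let s2 := PySem.Chars.stripChars s1 ['-']
  let s3 := if 63 < PySem.Chars.len s2 then pvRStripDash (PySem.Chars.slice s2 none (some 63)) else s2
  String.mk s3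

-- ===== PORT B =====
def sanitize_service_name_alt (name : String) : String :=
  let buf := (PySem.Chars.lower name.toList).foldl
      (fun buf c =>
        if PySem.Chars.isalnum c then buf ++ [c]
        else if buf ≠ [] ∧ buf.getLast? ≠ some '-' then buf ++ ['-'] else buf) []
  let s := pvRStripDash buf
  let s' := if 63 < PySem.Chars.len s then pvRStripDash (PySem.Chars.slice s none (some 63)) else s
  String.mk s'

-- ===== PRECONDITION & SPEC =====
def Spec_sanitize_service_name (name : String) (out : String) : Prop := out = sanitize_service_name_alt name
instance (name : String) (out : String) : Decidable (Spec_sanitize_service_name name out) := by unfold Spec_sanitize_service_name; infer_instance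

-- ===== CLAIM (what is proved, stated in full; the proofs are below) =====
def Claim_equal_sanitize_service_name : Prop := ∀ (name : String), Dom_sanitize_service_name name → Spec_sanitize_service_name name (sanitize_service_name name)

-- ===== LEMMAS AND PROOFS =====

-- canonical collapsed form: consecutive dashes squeezed to one
def pvSq : List Char → List Char
  | [] => []
  | c :: t => if c = '-' ∧ (pvSq t).head? = some '-' then pvSq t else c :: pvSq t

theorem pvSq_dash_head (t : List Char) : (pvSq ('-' :: t)).head? = some '-' := by
  show (if '-' = '-' ∧ (pvSq t).head? = some '-' then pvSq t else '-' :: pvSq t).head? = some '-'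
  split
  · next h => exact h.2
  · simp

theorem pvSq_cons_congr (c : Char) {x y : List Char} (h : pvSq x = pvSq y) :
    pvSq (c :: x) = pvSq (c :: y) := by
  show (if c = '-' ∧ (pvSq x).head? = some '-' then pvSq x else c :: pvSq x)
     = (if c = '-' ∧ (pvSq y).head? = some '-' then pvSq y else c :: pvSq y)
  rw [h]

theorem pvSq_rep (s : List Char) : pvSq (pvRep s) = pvSq s := by
  fun_induction pvRep with
  | case1 => rfl
  | case2 c => rfl
  | case3 c d t h ih =>
    obtain ⟨h1, h2⟩ := h; subst h1; subst h2
    have e1 : pvSq ('-' :: pvRep t) = pvSq ('-' :: t) := pvSq_cons_congr _ ih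
    rw [e1]
    show pvSq ('-' :: t) = pvSq ('-' :: '-' :: t)
    have : pvSq ('-' :: '-' :: t) = pvSq ('-' :: t) := by
      show (if '-' = '-' ∧ (pvSq ('-' :: t)).head? = some '-' then pvSq ('-' :: t) else _) = _
      rw [if_pos ⟨rfl, pvSq_dash_head t⟩]
    rw [this]
  | case4 c d t h ih =>
    exact pvSq_cons_congr _ ih

theorem pvSq_fixed (s : List Char) (h : ¬ ['-','-'] <:+: s) : pvSq s = s := by
  induction s with
  | nil => rfl
  | cons c t ih =>
    have ht : pvSq t = t := ih (fun hin => h (List.infix_cons_iff.mpr (Or.inr hin)))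
    show (if c = '-' ∧ (pvSq t).head? = some '-' then pvSq t else c :: pvSq t) = c :: t
    rw [ht]
    split
    · next hc =>
      exfalso
      obtain ⟨hc1, hc2⟩ := hc
      subst hc1
      cases t with
      | nil => simp at hc2
      | cons y t' =>
        simp at hc2
        subst hc2
        exact h (List.infix_cons_iff.mpr (Or.inl ⟨t', rfl⟩))
    · rfl

theorem pvALoop_eq_sq (s : List Char) : pvALoop s = pvSq s := by
  fun_induction pvALoop with
  | case1 s hin ih =>
    rw [ih, pvReplace_eq, pvSq_rep]
  | case2 s hin =>
    rw [pvSq_fixed]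
    intro hinf
    exact hin ((PySem.Chars.isIn_iff_infix _ _).mpr hinf)

theorem pvSq_chain (s : List Char) :
    List.IsChain (fun a b => ¬ (a = '-' ∧ b = '-')) (pvSq s) := by
  induction s with
  | nil => exact List.isChain_nil
  | cons c t ih =>
    show List.IsChain _ (if c = '-' ∧ (pvSq t).head? = some '-' then pvSq t else c :: pvSq t)
    split
    · exact ih
    · next hc =>
      rw [List.isChain_cons']
      refine ⟨?_, ih⟩
      intro b hb
      intro ⟨h1, h2⟩
      subst h1; subst h2
      exact hc ⟨rfl, hb⟩

theorem pvDropWhile_of_head {x : List Char} (h : x.head? ≠ some '-') :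
    x.dropWhile (fun c => c == '-') = x := by
  match x with
  | [] => rfl
  | y :: ys =>
    have : y ≠ '-' := by intro he; subst he; exact h rfl
    rw [List.dropWhile_cons, if_neg (by simp [this])]

theorem pvDropWhile_idem (l : List Char) :
    (l.dropWhile (fun c => c == '-')).dropWhile (fun c => c == '-')
      = l.dropWhile (fun c => c == '-') := by
  cases hd : l.dropWhile (fun c => c == '-') with
  | nil => rfl
  | cons y ys =>
    have hy := List.head_dropWhile_not (p := fun c => c == '-') (l := l) (by simp [hd])
    rw [List.dropWhile_cons, if_neg (by simpa [hd] using hy)]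

theorem pvSq_dash_cons (t : List Char) :
    pvSq ('-' :: t) = '-' :: (pvSq t).dropWhile (fun c => c == '-') := by
  show (if '-' = '-' ∧ (pvSq t).head? = some '-' then pvSq t else '-' :: pvSq t)
     = '-' :: (pvSq t).dropWhile (fun c => c == '-')
  split
  · next hc =>
    obtain ⟨x, hx⟩ : ∃ x, pvSq t = '-' :: x := by
      cases ht : pvSq t with
      | nil => rw [ht] at hc; simp at hc
      | cons y ys => rw [ht] at hc; simp at hc; exact ⟨ys, by rw [hc]⟩
    rw [hx]
    have hchain := pvSq_chain t
    rw [hx, List.isChain_cons'] at hchain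
    have hxh : x.head? ≠ some '-' := by
      intro hh
      exact hchain.1 '-' hh ⟨rfl, rfl⟩
    rw [List.dropWhile_cons, if_pos (by simp), pvDropWhile_of_head hxh]
  · next hc =>
    have hh : (pvSq t).head? ≠ some '-' := fun h => hc ⟨rfl, h⟩
    rw [pvDropWhile_of_head hh]

-- B's loop state machine, phrased on the mapped string (each char alnum or '-')
theorem pvFold_spec (m : List Char) (hm : ∀ c ∈ m, PySem.Chars.isalnum c = true ∨ c = '-') :
    ∀ buf : List Char,
      m.foldl (fun buf c =>
        if PySem.Chars.isalnum c then buf ++ [c]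
        else if buf ≠ [] ∧ buf.getLast? ≠ some '-' then buf ++ ['-'] else buf) buf
      = buf ++ (if buf = [] ∨ buf.getLast? = some '-'
                then (pvSq m).dropWhile (fun c => c == '-') else pvSq m) := by
  induction m with
  | nil => intro buf; split <;> simp [pvSq]
  | cons c t ih =>
    intro buf
    have hmt : ∀ c ∈ t, PySem.Chars.isalnum c = true ∨ c = '-' :=
      fun x hx => hm x (List.mem_cons_of_mem _ hx)
    rcases hm c List.mem_cons_self with halnum | hdash
    · -- alphanumeric: always appended
      have hcne : c ≠ '-' := by
        intro h; subst h; exact absurd halnum (by decide)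
      have hsq : pvSq (c :: t) = c :: pvSq t := by
        show (if c = '-' ∧ _ then _ else _) = _
        rw [if_neg (by intro hcc; exact hcne hcc.1)]
      rw [List.foldl_cons]
      simp only [if_pos halnum]
      rw [ih hmt (buf ++ [c])]
      have hlast : (buf ++ [c]).getLast? = some c := by simp
      rw [if_neg (by simp [hlast, hcne])]
      rw [hsq]
      split
      · rw [List.dropWhile_cons, if_neg (by simp [hcne])]; simp
      · simp
    · -- dash
      subst hdash
      have hnal : ¬ (PySem.Chars.isalnum '-' = true) := by decide
      rw [List.foldl_cons]
      simp only [if_neg hnal]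
      by_cases hD : buf = [] ∨ buf.getLast? = some '-'
      · -- skipped
        rw [if_neg (by rcases hD with h | h <;> simp [h])]
        rw [ih hmt buf, if_pos hD, if_pos hD]
        rw [pvSq_dash_cons, List.dropWhile_cons, if_pos (by simp)]
        rw [pvDropWhile_idem]
      · -- appended
        rw [not_or] at hD
        rw [if_pos ⟨hD.1, hD.2⟩]
        rw [ih hmt (buf ++ ['-'])]
        rw [if_pos (Or.inr (by simp)), pvSq_dash_cons]
        simp
        intro hC
        rcases hC with h | h
        · exact absurd h hD.1
        · exact absurd h hD.2

theorem pvStrip_eq (s : List Char) :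
    PySem.Chars.stripChars s ['-'] = pvRStripDash (s.dropWhile (fun c => c == '-')) := by
  have hp : (fun c => List.contains ['-'] c) = (fun c : Char => c == '-') := by
    funext c
    show (c == '-' || List.contains [] c) = (c == '-')
    simp
  show (List.dropWhile (fun c => List.contains ['-'] c)
          ((List.dropWhile (fun c => List.contains ['-'] c) s).reverse)).reverse = _
  rw [hp]
  rfl

theorem pvMain (name : String) :
    sanitize_service_name name = sanitize_service_name_alt name := by
  show (let m := (PySem.Chars.lower name.toList).map (fun c => if PySem.Chars.isalnum c then c else '-')
        let s1 := pvALoop m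
        let s2 := PySem.Chars.stripChars s1 ['-']
        let s3 := if 63 < PySem.Chars.len s2 then pvRStripDash (PySem.Chars.slice s2 none (some 63)) else s2
        String.mk s3)
      = (let buf := (PySem.Chars.lower name.toList).foldl
            (fun buf c =>
              if PySem.Chars.isalnum c then buf ++ [c]
              else if buf ≠ [] ∧ buf.getLast? ≠ some '-' then buf ++ ['-'] else buf) []
         let s := pvRStripDash buf
         let s' := if 63 < PySem.Chars.len s then pvRStripDash (PySem.Chars.slice s none (some 63)) else s
         String.mk s')
  simp only []
  have hstep :
      (fun (buf : List Char) (c : Char) =>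
        if PySem.Chars.isalnum c then buf ++ [c]
        else if buf ≠ [] ∧ buf.getLast? ≠ some '-' then buf ++ ['-'] else buf)
    = (fun (buf : List Char) (c : Char) =>
        (fun (buf : List Char) (c : Char) =>
          if PySem.Chars.isalnum c then buf ++ [c]
          else if buf ≠ [] ∧ buf.getLast? ≠ some '-' then buf ++ ['-'] else buf)
        buf (if PySem.Chars.isalnum c then c else '-')) := by
    funext buf c
    by_cases h : PySem.Chars.isalnum c = true
    · simp only [if_pos h]
    · simp only [if_neg h]
      rw [if_neg (show ¬ (PySem.Chars.isalnum '-' = true) by decide)]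
  have hfold : ∀ l : List Char,
      l.foldl (fun (buf : List Char) (c : Char) =>
        if PySem.Chars.isalnum c then buf ++ [c]
        else if buf ≠ [] ∧ buf.getLast? ≠ some '-' then buf ++ ['-'] else buf) []
      = (pvSq (l.map (fun c => if PySem.Chars.isalnum c then c else '-'))).dropWhile
          (fun c => c == '-') := by
    intro l
    have h1 : (l.map (fun c => if PySem.Chars.isalnum c then c else '-')).foldl
        (fun (buf : List Char) (c : Char) =>
          if PySem.Chars.isalnum c then buf ++ [c]
          else if buf ≠ [] ∧ buf.getLast? ≠ some '-' then buf ++ ['-'] else buf) []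
        = (pvSq (l.map (fun c => if PySem.Chars.isalnum c then c else '-'))).dropWhile
            (fun c => c == '-') := by
      rw [pvFold_spec _ (by
        intro x hx
        obtain ⟨c, hc, hfc⟩ := List.mem_map.mp hx
        by_cases h : PySem.Chars.isalnum c = true
        · left; rw [← hfc, if_pos h]; exact h
        · right; rw [← hfc, if_neg h]) []]
      rw [if_pos (Or.inl rfl)]
      simp
    have h2 := (List.foldl_map (f := fun c => if PySem.Chars.isalnum c then c else '-')
        (g := fun (buf : List Char) (c : Char) =>
          if PySem.Chars.isalnum c then buf ++ [c]
          else if buf ≠ [] ∧ buf.getLast? ≠ some '-' then buf ++ ['-'] else buf)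
        (l := l) (init := [])).symm
    rw [hstep]
    exact h2.trans h1
  rw [hfold, pvALoop_eq_sq, pvStrip_eq]

-- ===== VERDICT (by name: the statement is the Claim_ definition above) =====
theorem sanitize_service_name_spec : Claim_equal_sanitize_service_name := by
  intro name _
  unfold Spec_sanitize_service_name
  exact pvMain name
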